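-- pv_equiv track=rewrite | github.com/nyagami/Python-PTIT | PYKT13017 - BỘ BA SỐ PYTAGO (bản khó).py | powsols
-- ===== SOURCE A (Python) =====
-- def exp(p, e):
--     if e == 0: return 1
--     if e&1: return exp(p, e - 1) * p
--     P = exp(p, e // 2)
--     return P*P
--
-- def powsols(p, e):
--     P = exp(p, e)
--     res = 0
--     qr = [0]*P
--     for i in range(P): qr[i*i%P] += 1
--     for i in range(P): res += qr[i]*qr[(i+1)%P]
--     sq = 0
--     for i in range(0, P, p):
--         sq = i*i%P
--         res += qr[(sq+1)%P]
--     res *= P//p*(p-1)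
--     if e > 1: res += powsols(p, e-2)*p*p*p
--     else: res += 1
--     return res
-- ===== SOURCE B (Python) =====
-- def powsols(p, e):
--     def level_count(m):
--         P = p ** m
--         qr = [0] * P
--         for i in range(P):
--             qr[i * i % P] += 1
--         res = 0
--         for i in range(P):
--             res += qr[i] * qr[(i + 1) % P]
--         for i in range(0, P, p):
--             res += qr[(i * i % P + 1) % P]
--         return res * (P // p * (p - 1))
--
--     total = 0
--     weight = 1
--     m = e
--     while m > 1:
--         total += weight * level_count(m)
--         weight *= p ** 3
--         m -= 2
--     return total + weight * (level_count(m) + 1)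
-- ===== Notes on version B (the rewrite author's own statement) =====
-- stated objective: alternative
-- what changed: Replaced A's recursion over e (and its hand-rolled fast-exponentiation helper) by a single explicit while-loop that walks the levels m = e, e-2, ... accumulating total with a running weight p^3 per step, with the per-level count factored into a helper using p**m directly.
import Mathlib
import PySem

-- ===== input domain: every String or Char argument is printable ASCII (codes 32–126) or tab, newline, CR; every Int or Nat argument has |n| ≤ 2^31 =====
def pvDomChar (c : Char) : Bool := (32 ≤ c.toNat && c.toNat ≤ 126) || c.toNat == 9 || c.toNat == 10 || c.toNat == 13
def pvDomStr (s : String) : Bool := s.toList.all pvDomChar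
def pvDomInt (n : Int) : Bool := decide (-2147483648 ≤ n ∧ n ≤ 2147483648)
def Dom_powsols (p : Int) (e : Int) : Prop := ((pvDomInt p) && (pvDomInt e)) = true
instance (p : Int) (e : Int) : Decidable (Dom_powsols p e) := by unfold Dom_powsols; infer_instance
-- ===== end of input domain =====

-- B replaces A's recursion over e by an explicit accumulator loop over the levels (objective: alternative decomposition, same cost).
-- Both ports use a Nat fuel argument (e.toNat + 1, always sufficient) only to make the same recursion structurally total.

-- ===== PORT A =====
-- exp(p, e): fast exponentiation by squaring; for e < 0 Python diverges (excluded by Pre_),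
-- here the guard returns 1 there. For e > 0, Lean's e % 2 and e / 2 agree with Python's e&1 and e//2.
def expA (p : Int) : Nat → Int → Int
  | 0, _ => 1
  | f + 1, e =>
    if e ≤ 0 then 1
    else if e % 2 = 1 then expA p f (e - 1) * p
    else
      let P := expA p f (e / 2)
      P * P

-- literal port of A's powsols body; the Python list qr is an Array (same values and indices;
-- qr[i] += 1 is setIfInBounds/getD — the index is in range under Pre_),
-- i*i % P is PySem.Int.mod (exact Python %); sq = i*i%P is inlined into the third loop (sq is dead after it).
def powsolsGo (p : Int) : Nat → Int → Int
  | 0, _ => 0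
  | f + 1, e =>
    let P := expA p (e.toNat + 1) e
    let qr := (PySem.List.pyRange 0 P 1).foldl
      (fun q i => q.setIfInBounds (PySem.Int.mod (i * i) P).toNat
        (q.getD (PySem.Int.mod (i * i) P).toNat 0 + 1)) (Array.replicate P.toNat (0 : Int))
    let res := (PySem.List.pyRange 0 P 1).foldl
      (fun r i => r + qr.getD i.toNat 0 * qr.getD (PySem.Int.mod (i + 1) P).toNat 0) 0
    let res2 := (PySem.List.pyRange 0 P p).foldl
      (fun r i => r + qr.getD (PySem.Int.mod (PySem.Int.mod (i * i) P + 1) P).toNat 0) res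
    let res3 := res2 * (PySem.Int.floordiv P p * (p - 1))
    if e > 1 then res3 + powsolsGo p f (e - 2) * p * p * p else res3 + 1

def powsols (p : Int) (e : Int) : Int := powsolsGo p (e.toNat + 1) e

-- ===== PORT B =====
-- level_count m from Source B (p ** m is p ^ m.toNat; m ≥ 0 throughout under Pre_)
def levelCount (p : Int) (m : Int) : Int :=
  let P := p ^ m.toNat
  let qr := (PySem.List.pyRange 0 P 1).foldl
    (fun q i => q.setIfInBounds (PySem.Int.mod (i * i) P).toNat
      (q.getD (PySem.Int.mod (i * i) P).toNat 0 + 1)) (Array.replicate P.toNat (0 : Int))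
  let res := (PySem.List.pyRange 0 P 1).foldl
    (fun r i => r + qr.getD i.toNat 0 * qr.getD (PySem.Int.mod (i + 1) P).toNat 0) 0
  let res2 := (PySem.List.pyRange 0 P p).foldl
    (fun r i => r + qr.getD (PySem.Int.mod (PySem.Int.mod (i * i) P + 1) P).toNat 0) res
  res2 * (PySem.Int.floordiv P p * (p - 1))

-- the while loop of Source B, state (total, weight, m)
def altLoop (p : Int) : Nat → Int → Int → Int → Int
  | 0, total, _, _ => total
  | f + 1, total, weight, m =>
    if m > 1 then altLoop p f (total + weight * levelCount p m) (weight * p ^ 3) (m - 2)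
    else total + weight * (levelCount p m + 1)

def powsols_alt (p : Int) (e : Int) : Int := altLoop p (e.toNat + 1) 0 1 e

-- ===== PRECONDITION & SPEC =====
-- Pre_ is exactly the set of inputs on which Python A returns: A raises for e < 0
-- (RecursionError in exp), p = 0 (ValueError: range step 0 / ZeroDivisionError) and
-- p < 0 with e odd (IndexError: qr is empty since p**e < 0).
def Pre_powsols (p : Int) (e : Int) : Prop := 0 ≤ e ∧ p ≠ 0 ∧ (0 < p ∨ e % 2 = 0)
instance (p : Int) (e : Int) : Decidable (Pre_powsols p e) := by unfold Pre_powsols; infer_instance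
def pvWitness_powsols : Int × Int := (3, 4)

def Spec_powsols (p : Int) (e : Int) (out : Int) : Prop := out = powsols_alt p e
instance (p : Int) (e : Int) (out : Int) : Decidable (Spec_powsols p e out) := by unfold Spec_powsols; infer_instance

-- ===== CLAIM (what is proved, stated in full; the proofs are below) =====
def Claim_equal_powsols : Prop := ∀ (p : Int) (e : Int), Dom_powsols p e → Pre_powsols p e → Spec_powsols p e (powsols p e)

-- ===== LEMMAS AND PROOFS =====

lemma expA_pow (p : Int) : ∀ (f : Nat) (e : Int), e.toNat < f → 0 ≤ e → expA p f e = p ^ e.toNat := by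
  intro f
  induction f with
  | zero => intro e hf _; omega
  | succ f ih =>
    intro e hf he
    rw [expA]
    split_ifs with h1 h2
    · have he0 : e = 0 := by omega
      subst he0; simp
    · rw [ih (e - 1) (by omega) (by omega), ← pow_succ]
      congr 1; omega
    · rw [ih (e / 2) (by omega) (by omega), ← pow_add]
      congr 1; omega

lemma powsolsGo_succ (p : Int) (f : Nat) (e : Int) (he : 0 ≤ e) :
    powsolsGo p (f + 1) e = levelCount p e + (if e > 1 then powsolsGo p f (e - 2) * p * p * p else 1) := by
  rw [powsolsGo, expA_pow p (e.toNat + 1) e (by omega) he, levelCount]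
  split_ifs with h <;> simp only []

lemma altLoop_eq (p : Int) : ∀ (f : Nat) (e : Int), e.toNat < f → 0 ≤ e →
    ∀ (total weight : Int), altLoop p f total weight e = total + weight * powsolsGo p f e := by
  intro f
  induction f with
  | zero => intro e hf _; omega
  | succ f ih =>
    intro e hf he total weight
    rw [altLoop, powsolsGo_succ p f e he]
    by_cases h : e > 1
    · rw [if_pos h, if_pos h, ih (e - 2) (by omega) (by omega)]
      ring
    · rw [if_neg h, if_neg h]

-- ===== VERDICT (by name: the statement is the Claim_ definition above) =====
theorem powsols_spec : Claim_equal_powsols := by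
  intro p e _ hpre
  unfold Spec_powsols powsols_alt powsols
  rw [altLoop_eq p (e.toNat + 1) e (by omega) hpre.1]
  ring
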